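-- pv_equiv track=rewrite | github.com/AryanManojKumar/smart-map | backend/agents/capabilities.py | _build_node_summary
-- ===== SOURCE A (Python) =====
-- def _extract_section(text: str, heading: str) -> str:
--     """Pull out the text under a specific markdown ## heading."""
--     lines = text.split("\n")
--     capture = False
--     result = []
--     for line in lines:
--         if line.strip().startswith("## ") and heading.lower() in line.lower():
--             capture = True
--             continue
--         if capture and line.strip().startswith("## "):
--             break
--         if capture:
--             stripped = line.strip()
--             if stripped and not stripped.startswith("|---"):
--                 result.append(stripped)
--     return "\n".join(result)
--
-- def _build_node_summary(name: str, raw: str) -> str: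
--     """Compress one doc into a short summary suitable for the supervisor prompt."""
--     purpose = _extract_section(raw, "Purpose")
--     when_to_use = _extract_section(raw, "When to use")
--     when_not = _extract_section(raw, "When NOT to use")
--
--     lines = [f"### {name}"]
--     if purpose:
--         lines.append(purpose.split("\n")[0])
--     if when_to_use:
--         lines.append("Use when:")
--         for l in when_to_use.split("\n"):
--             l = l.strip()
--             if l.startswith("- "):
--                 lines.append(f"  {l}")
--     if when_not:
--         lines.append("Do NOT use when:")
--         for l in when_not.split("\n"):
--             l = l.strip()
--             if l.startswith("- "):
--                 lines.append(f"  {l}")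
--     return "\n".join(lines)
-- ===== SOURCE B (Python) =====
-- def _build_node_summary(name: str, raw: str) -> str:
--     """Group the document's lines under their headings in one pass, then look up
--     the three topics by substring match on the heading line."""
--     sections = []            # (lowercased heading line, stripped body lines)
--     body = None
--     for line in raw.split("\n"):
--         s = line.strip()
--         if s.startswith("## "):
--             body = []
--             sections.append((line.lower(), body))
--         elif body is not None and s and not s.startswith("|---"):
--             body.append(s)
--
--     def find(topic):
--         t = topic.lower()
--         return next((b for h, b in sections if t in h), [])
--
--     purpose = find("Purpose")
--     use = find("When to use")
--     not_use = find("When NOT to use")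
--
--     out = ["### " + name]
--     if purpose:
--         out.append(purpose[0])
--     if use:
--         out.append("Use when:")
--         out += ["  " + l for l in use if l.startswith("- ")]
--     if not_use:
--         out.append("Do NOT use when:")
--         out += ["  " + l for l in not_use if l.startswith("- ")]
--     return "\n".join(out)
-- ===== Notes on version B (the rewrite author's own statement) =====
-- stated objective: alternative
-- what changed: A re-scans all lines of raw once per queried heading inside _extract_section; B scans raw once, grouping the kept stripped lines under their (lowered) heading line, then answers each of the three topic queries by a first-match lookup over that section list. Pre_ excludes raws in which two adjacent markdown headings match the same queried topic: which section belongs to the topic is then ambiguous (a duplicate-key / first-vs-last-match corner) — A returns both sections' lines merged, B returns the first section — and neither value is specified.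
import Mathlib
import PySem

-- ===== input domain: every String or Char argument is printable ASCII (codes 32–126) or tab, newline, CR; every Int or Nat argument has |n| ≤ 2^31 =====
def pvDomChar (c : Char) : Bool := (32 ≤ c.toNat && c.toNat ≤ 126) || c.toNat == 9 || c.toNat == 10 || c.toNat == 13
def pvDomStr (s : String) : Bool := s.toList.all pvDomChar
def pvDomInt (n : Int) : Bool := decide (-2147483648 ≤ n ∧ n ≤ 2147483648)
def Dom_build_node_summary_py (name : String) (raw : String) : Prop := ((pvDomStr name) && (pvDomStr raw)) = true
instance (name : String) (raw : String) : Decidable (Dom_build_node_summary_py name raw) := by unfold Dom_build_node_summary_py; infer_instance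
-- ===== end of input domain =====

-- B replaces A's three full scans of `raw` (one per queried heading) by a single scan
-- that groups the kept lines under their heading line, plus a first-match lookup per
-- query (objective: alternative decomposition; same asymptotic cost).

-- ===== PORT A =====
-- the `for line in lines:` loop of `_extract_section` (capture flag, early `break`, result accumulator)
def pvExtractLoop (heading : String) : List String → Bool → List String → List String
  | [], _, acc => acc
  | line :: rest, capture, acc =>
    if PySem.Str.startswith (PySem.Str.strip line) "## "
        && PySem.Str.isIn (PySem.Str.lower heading) (PySem.Str.lower line) then
      pvExtractLoop heading rest true acc                -- capture = True; continue
    else if capture && PySem.Str.startswith (PySem.Str.strip line) "## " then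
      acc                                               -- break
    else if capture then
      let stripped := PySem.Str.strip line
      if stripped ≠ "" && !(PySem.Str.startswith stripped "|---") then
        pvExtractLoop heading rest capture (acc ++ [stripped])
      else pvExtractLoop heading rest capture acc
    else pvExtractLoop heading rest capture acc

-- _extract_section; `.getD []` only discharges the Option: split? is `some` since the sep "\n" is non-empty
def pvExtractSection (text : String) (heading : String) : String :=
  PySem.Str.join "\n" (pvExtractLoop heading ((PySem.Str.split? text "\n").getD []) false [])

def build_node_summary_py (name : String) (raw : String) : String :=
  let purpose := pvExtractSection raw "Purpose"
  let when_to_use := pvExtractSection raw "When to use"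
  let when_not := pvExtractSection raw "When NOT to use"
  let lines0 : List String := ["### " ++ name]
  -- `purpose.split("\n")[0]`: the list is never empty (split returns ≥ 1 piece), so [0] never raises
  let lines1 := if purpose ≠ "" then
      lines0 ++ [PySem.List.pyGetD ((PySem.Str.split? purpose "\n").getD []) 0 ""]
    else lines0
  let lines2 := if when_to_use ≠ "" then
      ((PySem.Str.split? when_to_use "\n").getD []).foldl
        (fun acc l =>
          let l' := PySem.Str.strip l
          if PySem.Str.startswith l' "- " then acc ++ ["  " ++ l'] else acc)
        (lines1 ++ ["Use when:"])
    else lines1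
  let lines3 := if when_not ≠ "" then
      ((PySem.Str.split? when_not "\n").getD []).foldl
        (fun acc l =>
          let l' := PySem.Str.strip l
          if PySem.Str.startswith l' "- " then acc ++ ["  " ++ l'] else acc)
        (lines2 ++ ["Do NOT use when:"])
    else lines2
  PySem.Str.join "\n" lines3

-- ===== PORT B =====
-- single pass over the lines: group each kept (stripped, non-empty, non-"|---") line
-- under the lowered text of the heading line above it
def pvSections : List String → Option (String × List String) → List (String × List String)
  | [], none => []
  | [], some hb => [hb]
  | line :: rest, cur =>
    let s := PySem.Str.strip line
    if PySem.Str.startswith s "## " then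
      match cur with
      | none => pvSections rest (some (PySem.Str.lower line, []))
      | some hb => hb :: pvSections rest (some (PySem.Str.lower line, []))
    else if cur.isSome && (s ≠ "" && !(PySem.Str.startswith s "|---")) then
      pvSections rest (cur.map (fun hb => (hb.1, hb.2 ++ [s])))
    else
      pvSections rest cur

-- `find`: body of the first section whose heading contains the lowered topic
def pvFindGo (t : String) : List (String × List String) → List String
  | [] => []
  | (h, b) :: rest => if PySem.Str.isIn t h then b else pvFindGo t rest

def pvFind (sections : List (String × List String)) (topic : String) : List String :=
  pvFindGo (PySem.Str.lower topic) sections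

def build_node_summary_py_alt (name : String) (raw : String) : String :=
  let sections := pvSections ((PySem.Str.split? raw "\n").getD []) none
  let purpose := pvFind sections "Purpose"
  let use := pvFind sections "When to use"
  let not_use := pvFind sections "When NOT to use"
  let out0 : List String := ["### " ++ name]
  let out1 := if purpose ≠ [] then out0 ++ [purpose.headD ""] else out0
  let out2 := if use ≠ [] then
      (out1 ++ ["Use when:"])
        ++ (use.filter (fun l => PySem.Str.startswith l "- ")).map (fun l => "  " ++ l)
    else out1
  let out3 := if not_use ≠ [] then
      (out2 ++ ["Do NOT use when:"])
        ++ (not_use.filter (fun l => PySem.Str.startswith l "- ")).map (fun l => "  " ++ l)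
    else out2
  PySem.Str.join "\n" out3

-- ===== PRECONDITION & SPEC =====
-- Pre_ excludes raws in which two ADJACENT markdown headings match the same queried
-- topic: which section belongs to the topic is then ambiguous (a duplicate-key /
-- first-vs-last-match corner); A returns both sections' lines merged, B returns the
-- first section, and neither value is specified.
def Pre_build_node_summary_py (name : String) (raw : String) : Prop :=
  List.IsChain
    (fun a b => ∀ q ∈ (["purpose", "when to use", "when not to use"] : List String),
      ¬ (PySem.Str.isIn q (PySem.Str.lower a) = true ∧ PySem.Str.isIn q (PySem.Str.lower b) = true))
    (((PySem.Str.split? raw "\n").getD []).filter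
      (fun l => PySem.Str.startswith (PySem.Str.strip l) "## "))
instance (name : String) (raw : String) : Decidable (Pre_build_node_summary_py name raw) := by
  unfold Pre_build_node_summary_py; infer_instance

def pvWitness_build_node_summary_py : String × String := ("n", "## Purpose\np")

def Spec_build_node_summary_py (name : String) (raw : String) (out : String) : Prop := out = build_node_summary_py_alt name raw
instance (name : String) (raw : String) (out : String) : Decidable (Spec_build_node_summary_py name raw out) := by unfold Spec_build_node_summary_py; infer_instance

-- ===== CLAIM (what is proved, stated in full; the proofs are below) =====
def Claim_equal_build_node_summary_py : Prop := ∀ (name : String) (raw : String), Dom_build_node_summary_py name raw → Pre_build_node_summary_py name raw → Spec_build_node_summary_py name raw (build_node_summary_py name raw)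

-- ===== LEMMAS AND PROOFS =====

theorem pvExtractLoop_acc (q : String) (lines : List String) (cap : Bool) (acc : List String) :
    pvExtractLoop q lines cap acc = acc ++ pvExtractLoop q lines cap [] := by
  induction lines generalizing cap acc with
  | nil => simp [pvExtractLoop]
  | cons line rest ih =>
    simp only [pvExtractLoop]
    split_ifs with h1 h2 h3 h4
    · exact ih _ _
    · simp
    · rw [ih _ (acc ++ [_]), ih _ ([] ++ [_])]; simp
    · exact ih _ _
    · exact ih _ _

-- stripped kept lines up to (excluding) the first heading line
def pvBody : List String → List String
  | [] => []
  | line :: rest =>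
    let s := PySem.Str.strip line
    if PySem.Str.startswith s "## " then []
    else if s ≠ "" && !(PySem.Str.startswith s "|---") then s :: pvBody rest
    else pvBody rest

-- when capture is on and the first heading of `lines` does not match, A collects pvBody
theorem pvExtractLoop_true_eq_body (q : String) (lines : List String)
    (hf : ∀ h, (lines.filter (fun l => PySem.Str.startswith (PySem.Str.strip l) "## ")).head? = some h →
      PySem.Str.isIn (PySem.Str.lower q) (PySem.Str.lower h) = false) :
    pvExtractLoop q lines true [] = pvBody lines := by
  induction lines with
  | nil => rfl
  | cons line rest ih =>
    cases hA : PySem.Str.startswith (PySem.Str.strip line) "## " with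
    | true =>
      have hm := hf line (by
        simp only [List.filter_cons, hA, eq_self_iff_true, if_true, List.head?_cons])
      simp only [pvExtractLoop, pvBody, hA, hm, Bool.and_false, Bool.true_and, Bool.and_self,
        eq_self_iff_true, Bool.false_eq_true, if_false, if_true]
    | false =>
      have hf' : ∀ h, (rest.filter (fun l => PySem.Str.startswith (PySem.Str.strip l) "## ")).head? = some h →
          PySem.Str.isIn (PySem.Str.lower q) (PySem.Str.lower h) = false := by
        intro h hh
        exact hf h (by simp only [List.filter_cons, hA, Bool.false_eq_true, if_false]; exact hh)
      cases hG : (decide (PySem.Str.strip line ≠ "") && !(PySem.Str.startswith (PySem.Str.strip line) "|---")) with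
      | true =>
        simp only [pvExtractLoop, pvBody, hA, hG, Bool.false_and, Bool.false_eq_true, if_false,
          Bool.and_false, if_true, Bool.true_and]
        rw [show ([] ++ [PySem.Str.strip line] : List String) = [PySem.Str.strip line] from rfl,
          pvExtractLoop_acc q rest true [PySem.Str.strip line], ih hf']
        simp
      | false =>
        simp only [pvExtractLoop, pvBody, hA, hG, Bool.false_and, Bool.false_eq_true, if_false,
          Bool.and_false, if_true, Bool.true_and]
        exact ih hf'

-- the first section emitted from state (k, b) carries b ++ pvBody lines
theorem pvSections_first (lines : List String) (k : String) (b : List String) :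
    ∃ t, pvSections lines (some (k, b)) = (k, b ++ pvBody lines) :: t := by
  induction lines generalizing b with
  | nil => exact ⟨[], by simp [pvSections, pvBody]⟩
  | cons line rest ih =>
    cases hA : PySem.Str.startswith (PySem.Str.strip line) "## " with
    | true =>
      refine ⟨pvSections rest (some (PySem.Str.lower line, [])), ?_⟩
      simp only [pvSections, pvBody, hA, if_true, List.append_nil]
    | false =>
      cases hG : (decide (PySem.Str.strip line ≠ "") && !(PySem.Str.startswith (PySem.Str.strip line) "|---")) with
      | true =>
        obtain ⟨t, ht⟩ := ih (b ++ [PySem.Str.strip line])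
        refine ⟨t, ?_⟩
        simp only [pvSections, hA, Bool.false_eq_true, if_false, hG, Option.isSome_some,
          Bool.true_and, if_true, Option.map_some, ht, pvBody, List.append_assoc,
          List.singleton_append]
      | false =>
        obtain ⟨t, ht⟩ := ih b
        refine ⟨t, ?_⟩
        simp only [pvSections, hA, Bool.false_eq_true, if_false, hG, Option.isSome_some,
          Bool.true_and, if_true, ht, pvBody]

-- abbreviation for the per-query chain relation used below
def pvRel (ql : String) (a b : String) : Prop :=
  PySem.Str.isIn ql (PySem.Str.lower a) = true → PySem.Str.isIn ql (PySem.Str.lower b) = true → False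

def pvHeads (lines : List String) : List String :=
  lines.filter (fun l => PySem.Str.startswith (PySem.Str.strip l) "## ")

-- matching current heading: B's find returns b ++ pvBody lines
theorem pvFindGo_match (ql : String) (lines : List String) (k : String) (b : List String)
    (hk : PySem.Str.isIn ql k = true) :
    pvFindGo ql (pvSections lines (some (k, b))) = b ++ pvBody lines := by
  obtain ⟨t, ht⟩ := pvSections_first lines k b
  rw [ht]; simp only [pvFindGo, hk, if_true]

-- non-matching current heading: B's find behaves like A's non-capturing scan
theorem pvFindGo_skip (q : String) (lines : List String) (k : String) (b : List String)
    (hk : PySem.Str.isIn (PySem.Str.lower q) k = false)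
    (hchain : List.IsChain (pvRel (PySem.Str.lower q)) (pvHeads lines)) :
    pvFindGo (PySem.Str.lower q) (pvSections lines (some (k, b)))
      = pvExtractLoop q lines false [] := by
  induction lines generalizing k b with
  | nil => simp only [pvSections, pvFindGo, pvExtractLoop, hk, Bool.false_eq_true, if_false]
  | cons line rest ih =>
    cases hA : PySem.Str.startswith (PySem.Str.strip line) "## " with
    | true =>
      have hheads : pvHeads (line :: rest) = line :: pvHeads rest := by
        simp only [pvHeads, List.filter_cons, hA, if_true]
      rw [hheads] at hchain
      cases hI : PySem.Str.isIn (PySem.Str.lower q) (PySem.Str.lower line) with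
      | true =>
        have hf : ∀ h, (pvHeads rest).head? = some h →
            PySem.Str.isIn (PySem.Str.lower q) (PySem.Str.lower h) = false := by
          intro h hh
          cases hhd : pvHeads rest with
          | nil => simp [hhd] at hh
          | cons x xs =>
            rw [hhd] at hh hchain
            have hrel := (List.isChain_cons_cons.mp hchain).1
            have hx : x = h := by simpa using hh
            rw [← hx]
            cases hb : PySem.Str.isIn (PySem.Str.lower q) (PySem.Str.lower x) with
            | false => rfl
            | true => exact (hrel hI hb).elim
        simp only [pvSections, pvExtractLoop, hA, hI, Bool.and_self, if_true, pvFindGo, hk,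
          Bool.false_eq_true, if_false]
        rw [pvFindGo_match (PySem.Str.lower q) rest _ [] hI]
        rw [pvExtractLoop_true_eq_body q rest hf]
        simp
      | false =>
        simp only [pvSections, pvExtractLoop, hA, hI, Bool.and_false, Bool.false_and,
          Bool.false_eq_true, if_false, if_true, pvFindGo, hk]
        exact ih _ [] hI hchain.tail
    | false =>
      have hheads : pvHeads (line :: rest) = pvHeads rest := by
        simp only [pvHeads, List.filter_cons, hA, Bool.false_eq_true, if_false]
      rw [hheads] at hchain
      cases hG : (decide (PySem.Str.strip line ≠ "") && !(PySem.Str.startswith (PySem.Str.strip line) "|---")) with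
      | true =>
        simp only [pvSections, pvExtractLoop, hA, hG, Bool.and_false, Bool.false_and,
          Bool.false_eq_true, if_false, Option.isSome_some, Bool.true_and, if_true,
          Option.map_some]
        exact ih _ _ hk hchain
      | false =>
        simp only [pvSections, pvExtractLoop, hA, hG, Bool.and_false, Bool.false_and,
          Bool.false_eq_true, if_false, Option.isSome_some, Bool.true_and, if_true]
        exact ih _ _ hk hchain

theorem pvFind_eq_extractLoop (q : String) (lines : List String)
    (hchain : List.IsChain (pvRel (PySem.Str.lower q)) (pvHeads lines)) :
    pvFindGo (PySem.Str.lower q) (pvSections lines none) = pvExtractLoop q lines false [] := by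
  induction lines with
  | nil => rfl
  | cons line rest ih =>
    cases hA : PySem.Str.startswith (PySem.Str.strip line) "## " with
    | true =>
      have hheads : pvHeads (line :: rest) = line :: pvHeads rest := by
        simp only [pvHeads, List.filter_cons, hA, if_true]
      rw [hheads] at hchain
      cases hI : PySem.Str.isIn (PySem.Str.lower q) (PySem.Str.lower line) with
      | true =>
        have hf : ∀ h, (pvHeads rest).head? = some h →
            PySem.Str.isIn (PySem.Str.lower q) (PySem.Str.lower h) = false := by
          intro h hh
          cases hhd : pvHeads rest with
          | nil => simp [hhd] at hh
          | cons x xs =>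
            rw [hhd] at hh hchain
            have hrel := (List.isChain_cons_cons.mp hchain).1
            have hx : x = h := by simpa using hh
            rw [← hx]
            cases hb : PySem.Str.isIn (PySem.Str.lower q) (PySem.Str.lower x) with
            | false => rfl
            | true => exact (hrel hI hb).elim
        simp only [pvSections, pvExtractLoop, hA, hI, Bool.and_self, if_true]
        rw [pvFindGo_match (PySem.Str.lower q) rest _ [] hI]
        rw [pvExtractLoop_true_eq_body q rest hf]
        simp
      | false =>
        simp only [pvSections, pvExtractLoop, hA, hI, Bool.and_false, Bool.false_and,
          Bool.false_eq_true, if_false, if_true]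
        exact pvFindGo_skip q rest _ [] hI hchain.tail
    | false =>
      have hheads : pvHeads (line :: rest) = pvHeads rest := by
        simp only [pvHeads, List.filter_cons, hA, Bool.false_eq_true, if_false]
      rw [hheads] at hchain
      cases hG : (decide (PySem.Str.strip line ≠ "") && !(PySem.Str.startswith (PySem.Str.strip line) "|---")) with
      | true =>
        simp only [pvSections, pvExtractLoop, hA, hG, Bool.and_false, Bool.false_and,
          Bool.false_eq_true, if_false, Option.isSome_none, if_true, Option.map_none]
        exact ih hchain
      | false =>
        simp only [pvSections, pvExtractLoop, hA, hG, Bool.and_false, Bool.false_and,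
          Bool.false_eq_true, if_false, Option.isSome_none]
        exact ih hchain

def pvSplit1 (c : Char) : List Char → List Char → List (List Char)
  | [], cur => [cur.reverse]
  | x :: rest, cur => if x = c then cur.reverse :: pvSplit1 c rest [] else pvSplit1 c rest (x :: cur)

theorem pvSplitOn_go_eq (c : Char) (fuel : Nat) (l cur : List Char) (acc : List (List Char))
    (h : l.length < fuel) :
    PySem.Chars.splitOn.go [c] fuel l cur acc = acc.reverse ++ pvSplit1 c l cur := by
  induction fuel generalizing l cur acc with
  | zero => omega
  | succ f ih =>
    cases l with
    | nil => simp [PySem.Chars.splitOn.go, pvSplit1]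
    | cons x rest =>
      by_cases hx : x = c
      · rw [show PySem.Chars.splitOn.go [c] (f+1) (x::rest) cur acc
              = PySem.Chars.splitOn.go [c] f rest [] (cur.reverse :: acc) from by
            simp [PySem.Chars.splitOn.go, List.isPrefixOf, hx]]
        rw [ih _ _ _ (by simp at h ⊢; omega)]
        simp [pvSplit1, hx]
      · rw [show PySem.Chars.splitOn.go [c] (f+1) (x::rest) cur acc
              = PySem.Chars.splitOn.go [c] f rest (x :: cur) acc from by
            simp [PySem.Chars.splitOn.go, List.isPrefixOf, Ne.symm hx]]
        rw [ih _ _ _ (by simp at h ⊢; omega)]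
        simp [pvSplit1, hx]

theorem pvSplitOn_eq (c : Char) (s : List Char) :
    PySem.Chars.splitOn s [c] = pvSplit1 c s [] := by
  unfold PySem.Chars.splitOn
  rw [pvSplitOn_go_eq c (s.length+1) s [] [] (by omega)]
  rfl

theorem pvSplit1_no_sep (c : Char) (l cur : List Char) (hcur : c ∉ cur) :
    ∀ x ∈ pvSplit1 c l cur, c ∉ x := by
  induction l generalizing cur with
  | nil => simp only [pvSplit1]; intro x hx; simp at hx; subst hx; simpa using hcur
  | cons y rest ih =>
    simp only [pvSplit1]
    by_cases hy : y = c
    · subst hy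
      rw [if_pos rfl]
      intro x hx
      rcases List.mem_cons.mp hx with h1 | h2
      · subst h1; simpa using hcur
      · exact ih [] (by simp) x h2
    · rw [if_neg hy]
      refine ih (y :: cur) ?_
      simp only [List.mem_cons, not_or]
      exact ⟨fun h => hy h.symm, hcur⟩

theorem pvSplit1_append (c : Char) (p r cur : List Char) (hp : c ∉ p) :
    pvSplit1 c (p ++ r) cur = pvSplit1 c r (p.reverse ++ cur) := by
  induction p generalizing cur with
  | nil => simp
  | cons y t ih =>
    have hy : y ≠ c := fun h => hp (h ▸ List.mem_cons_self)
    simp only [List.cons_append, pvSplit1, if_neg hy]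
    rw [ih _ (fun h => hp (List.mem_cons_of_mem _ h))]
    simp

theorem pvSplit1_join (c : Char) (Pl : List (List Char)) (hne : Pl ≠ [])
    (hfree : ∀ p ∈ Pl, c ∉ p) :
    pvSplit1 c (PySem.Chars.join [c] Pl) [] = Pl := by
  induction Pl with
  | nil => exact absurd rfl hne
  | cons p t ih =>
    cases t with
    | nil =>
      rw [PySem.Chars.join_singleton]
      rw [show (p : List Char) = p ++ [] from (List.append_nil p).symm]
      rw [pvSplit1_append c p [] [] (by simpa using hfree p (List.mem_cons_self))]
      simp [pvSplit1]
    | cons q t' =>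
      rw [PySem.Chars.join_cons_cons]
      rw [List.append_assoc]
      rw [pvSplit1_append c p _ [] (hfree p List.mem_cons_self)]
      have : ([c] ++ PySem.Chars.join [c] (q :: t') : List Char) = c :: PySem.Chars.join [c] (q :: t') := rfl
      rw [this]
      simp only [pvSplit1, if_pos rfl]
      rw [ih (by simp) (fun x hx => hfree x (List.mem_cons_of_mem _ hx))]
      simp

theorem pvStrip_sublist (l : List Char) : (PySem.Chars.strip l).Sublist l := by
  unfold PySem.Chars.strip PySem.Chars.rstrip PySem.Chars.lstrip
  have h1 : (List.dropWhile PySem.Chars.isspace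
      (List.dropWhile PySem.Chars.isspace l).reverse).Sublist
      (List.dropWhile PySem.Chars.isspace l).reverse := List.dropWhile_sublist _
  have h2 := h1.reverse
  rw [List.reverse_reverse] at h2
  exact h2.trans (List.dropWhile_sublist _)

theorem pvStrip_idem (l : List Char) :
    PySem.Chars.strip (PySem.Chars.strip l) = PySem.Chars.strip l := by
  unfold PySem.Chars.strip PySem.Chars.rstrip PySem.Chars.lstrip
  set sp := PySem.Chars.isspace with hsp
  set t := List.dropWhile sp l with ht
  set u := List.dropWhile sp t.reverse with hu
  have hut : u = List.dropWhile sp u := (List.dropWhile_idempotent sp t.reverse).symm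
  have ht0 : ∀ (hl : 0 < t.length), ¬ sp t[0] = true :=
    List.dropWhile_eq_self_iff.mp (List.dropWhile_idempotent sp l)
  obtain ⟨r, hr⟩ : u <:+ t.reverse := List.dropWhile_suffix _
  have hpre : u.reverse ++ r.reverse = t := by
    have := congrArg List.reverse hr
    simpa using this
  have h1 : List.dropWhile sp u.reverse = u.reverse := by
    rw [List.dropWhile_eq_self_iff]
    intro hl
    have ht0' : ∀ (hl2 : 0 < (u.reverse ++ r.reverse).length),
        ¬ sp ((u.reverse ++ r.reverse)[0]'hl2) = true := by
      simp only [hpre]; exact ht0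
    have h := ht0' (by simp only [List.length_append]; omega)
    rwa [List.getElem_append_left hl] at h
  rw [h1, List.reverse_reverse, ← hut]

-- elements of A's loop output: non-empty, newline-free, already stripped
def pvOk (x : String) : Prop := x ≠ "" ∧ '\n' ∉ x.toList ∧ PySem.Str.strip x = x

theorem pvStrStrip_idem (s : String) : PySem.Str.strip (PySem.Str.strip s) = PySem.Str.strip s := by
  apply String.toList_inj.mp
  simp only [PySem.Str.toList_strip]
  exact pvStrip_idem s.toList

theorem pvLines_eq (raw : String) :
    (PySem.Str.split? raw "\n").getD []
      = (pvSplit1 '\n' raw.toList []).map String.ofList := by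
  have hsep : ("\n" : String).toList = ['\n'] := by decide
  simp only [PySem.Str.split?, PySem.Chars.split?, hsep]
  simp only [List.isEmpty_cons, if_false, Option.map_some, Option.getD_some, Bool.false_eq_true]
  rw [pvSplitOn_eq]

theorem pvSplitLines_no_nl (raw : String) :
    ∀ l ∈ (PySem.Str.split? raw "\n").getD [], '\n' ∉ l.toList := by
  rw [pvLines_eq]
  intro l hl
  obtain ⟨cs, hcs, hofl⟩ := List.mem_map.mp hl
  rw [← hofl, String.toList_ofList]
  exact pvSplit1_no_sep '\n' raw.toList [] (by simp) cs hcs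

theorem pvJoin_ne_empty (P : List String) (hP : ∀ x ∈ P, pvOk x) :
    (PySem.Str.join "\n" P ≠ "") ↔ P ≠ [] := by
  have hsep : ("\n" : String).toList = ['\n'] := by decide
  constructor
  · intro h hPnil
    subst hPnil
    exact h (by apply String.toList_inj.mp; simp [PySem.Str.toList_join, PySem.Chars.join_nil])
  · intro hne h
    have htl := congrArg String.toList h
    rw [PySem.Str.toList_join, hsep] at htl
    cases P with
    | nil => exact hne rfl
    | cons p t =>
      cases t with
      | nil =>
        simp only [List.map_cons, List.map_nil, PySem.Chars.join_singleton] at htl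
        have h1 : p ≠ "" := (hP p (List.mem_cons_self)).1
        exact h1 (by apply String.toList_inj.mp; simpa using htl)
      | cons q t' =>
        rw [List.map_cons, List.map_cons, PySem.Chars.join_cons_cons] at htl
        simp at htl

theorem pvSplit_join (P : List String) (hne : P ≠ []) (hP : ∀ x ∈ P, pvOk x) :
    (PySem.Str.split? (PySem.Str.join "\n" P) "\n").getD [] = P := by
  rw [pvLines_eq]
  have hsep : ("\n" : String).toList = ['\n'] := by decide
  rw [PySem.Str.toList_join, hsep]
  rw [pvSplit1_join '\n' (P.map String.toList)
    (by simpa using hne)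
    (by intro p hp; obtain ⟨x, hx, rfl⟩ := List.mem_map.mp hp; exact (hP x hx).2.1)]
  simp [List.map_map, Function.comp_def, String.ofList_toList]

theorem pvExtractLoop_ok (q : String) (lines : List String) (cap : Bool) (acc : List String)
    (hl : ∀ l ∈ lines, '\n' ∉ l.toList) (ha : ∀ x ∈ acc, pvOk x) :
    ∀ x ∈ pvExtractLoop q lines cap acc, pvOk x := by
  induction lines generalizing cap acc with
  | nil => simpa [pvExtractLoop] using ha
  | cons line rest ih =>
    have hl' : ∀ l ∈ rest, '\n' ∉ l.toList := fun l h => hl l (List.mem_cons_of_mem _ h)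
    have hline : '\n' ∉ line.toList := hl line List.mem_cons_self
    simp only [pvExtractLoop]
    split_ifs with h1 h2 h3 h4
    · exact ih _ _ hl' ha
    · exact ha
    · refine ih _ _ hl' ?_
      intro x hx
      rcases List.mem_append.mp hx with hx | hx
      · exact ha x hx
      · have hx' : x = PySem.Str.strip line := by simpa using hx
        subst hx'
        refine ⟨?_, ?_, pvStrStrip_idem line⟩
        · have := (Bool.and_eq_true _ _).mp h4 |>.1
          simpa using of_decide_eq_true this
        · intro hmem
          rw [PySem.Str.toList_strip] at hmem
          exact hline ((pvStrip_sublist line.toList).subset hmem)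
    · exact ih _ _ hl' ha
    · exact ih _ _ hl' ha

theorem pvSection_ok (raw q : String) :
    ∀ x ∈ pvExtractLoop q ((PySem.Str.split? raw "\n").getD []) false [], pvOk x :=
  pvExtractLoop_ok q _ false [] (pvSplitLines_no_nl raw) (by simp)

-- the two if-blocks of the assembly, A-form rewritten to B-form
theorem pvHeadD_block (P : List String) (hP : ∀ x ∈ P, pvOk x) (pre : List String) :
    (if PySem.Str.join "\n" P ≠ "" then
        pre ++ [PySem.List.pyGetD ((PySem.Str.split? (PySem.Str.join "\n" P) "\n").getD []) 0 ""]
      else pre)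
    = (if P ≠ [] then pre ++ [P.headD ""] else pre) := by
  by_cases h : P = []
  · subst h
    simp [pvJoin_ne_empty [] (by simp)]
  · rw [if_pos ((pvJoin_ne_empty P hP).mpr h), if_pos h, pvSplit_join P h hP]
    cases P with
    | nil => exact absurd rfl h
    | cons p t => simp [PySem.List.pyGetD]

theorem pvBullet_block (P : List String) (hP : ∀ x ∈ P, pvOk x) (pre : List String) (hdr : String) :
    (if PySem.Str.join "\n" P ≠ "" then
        ((PySem.Str.split? (PySem.Str.join "\n" P) "\n").getD []).foldl
          (fun acc l =>
            let l' := PySem.Str.strip l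
            if PySem.Str.startswith l' "- " then acc ++ ["  " ++ l'] else acc)
          (pre ++ [hdr])
      else pre)
    = (if P ≠ [] then
        (pre ++ [hdr]) ++ (P.filter (fun l => PySem.Str.startswith l "- ")).map (fun l => "  " ++ l)
      else pre) := by
  by_cases h : P = []
  · subst h
    simp [pvJoin_ne_empty [] (by simp)]
  · rw [if_pos ((pvJoin_ne_empty P hP).mpr h), if_pos h, pvSplit_join P h hP]
    show List.foldl (fun acc l => if (fun l => PySem.Str.startswith (PySem.Str.strip l) "- ") l = true
        then acc ++ [(fun l => "  " ++ PySem.Str.strip l) l] else acc) (pre ++ [hdr]) P = _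
    rw [PySem.List.foldl_append_if (fun l => PySem.Str.startswith (PySem.Str.strip l) "- ")
      (fun l => "  " ++ PySem.Str.strip l) P (pre ++ [hdr])]
    congr 1
    rw [List.filter_congr (fun x hx => by rw [(hP x hx).2.2])]
    exact List.map_congr_left (fun x hx => by rw [(hP x (List.mem_of_mem_filter hx)).2.2])

-- Pre_'s adjacent-heading condition yields the per-query chain relation for q
theorem pvChain_of_pre (raw : String) (q : String)
    (hq : PySem.Str.lower q ∈ (["purpose", "when to use", "when not to use"] : List String))
    (hpre : Pre_build_node_summary_py "" raw) :
    List.IsChain (pvRel (PySem.Str.lower q)) (pvHeads ((PySem.Str.split? raw "\n").getD [])) := by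
  unfold Pre_build_node_summary_py at hpre
  refine List.IsChain.imp ?_ hpre
  intro a b hab
  intro h1 h2
  exact hab (PySem.Str.lower q) hq ⟨h1, h2⟩

theorem pvSection_eq (raw q : String)
    (hq : PySem.Str.lower q ∈ (["purpose", "when to use", "when not to use"] : List String))
    (hpre : Pre_build_node_summary_py "" raw) :
    pvFind (pvSections ((PySem.Str.split? raw "\n").getD []) none) q
      = pvExtractLoop q ((PySem.Str.split? raw "\n").getD []) false [] :=
  pvFind_eq_extractLoop q _ (pvChain_of_pre raw q hq hpre)

-- ===== VERDICT (by name: the statement is the Claim_ definition above) =====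
theorem build_node_summary_py_spec : Claim_equal_build_node_summary_py := by
  intro name raw _ hpre
  have hpre' : Pre_build_node_summary_py "" raw := hpre
  unfold Spec_build_node_summary_py
  simp only [build_node_summary_py, build_node_summary_py_alt, pvExtractSection]
  rw [pvSection_eq raw "Purpose" (by decide) hpre',
    pvSection_eq raw "When to use" (by decide) hpre',
    pvSection_eq raw "When NOT to use" (by decide) hpre']
  rw [pvHeadD_block _ (pvSection_ok raw "Purpose") _]
  rw [pvBullet_block _ (pvSection_ok raw "When to use") _ _]
  rw [pvBullet_block _ (pvSection_ok raw "When NOT to use") _ _]
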